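-- pv_equiv track=rewrite | github.com/DaveUgalde/AnalyzerBrain | src/agents/architect_agent.py | _assess_pattern_applicability
-- ===== SOURCE A (Python) =====
-- from typing import Dict, List, Optional, Any
--
-- def _assess_pattern_applicability(pattern_name: str, current_architecture: Dict,
--                                  requirements: Dict) -> str:
--     """Assess pattern applicability."""
--     current_style = current_architecture.get("style", "unknown")
--
--     applicability_map = {
--         "microservices": {
--             "high": ["monolithic", "layered"],
--             "medium": ["event_driven"],
--             "low": ["microservices"]
--         },
--         "layered": {
--             "high": ["monolithic"],
--             "medium": ["microservices", "event_driven"],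
--             "low": ["layered"]
--         },
--         "event_driven": {
--             "high": ["monolithic", "layered"],
--             "medium": ["microservices"],
--             "low": ["event_driven"]
--         },
--         "hexagonal": {
--             "high": ["monolithic", "layered"],
--             "medium": ["microservices"],
--             "low": ["hexagonal", "event_driven"]
--         }
--     }
--
--     if pattern_name in applicability_map:
--         pattern_applicability = applicability_map[pattern_name]
--         for applicability, styles in pattern_applicability.items():
--             if current_style in styles:
--                 return applicability
--
--     return "unknown"
-- ===== SOURCE B (Python) =====
-- def _assess_pattern_applicability(pattern_name: str, current_architecture: dict,
--                                   requirements: dict) -> str: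
--     """Assess pattern applicability."""
--     style = current_architecture.get("style", "unknown")
--     if pattern_name not in ("microservices", "layered", "event_driven", "hexagonal"):
--         return "unknown"
--     # Rule-based: migrating INTO the style you already have is low value;
--     # hexagonal additionally rates event_driven low.
--     if style == pattern_name or (pattern_name == "hexagonal" and style == "event_driven"):
--         return "low"
--     # From monolithic every pattern is high; from layered every other pattern is high.
--     if style == "monolithic" or (style == "layered" and pattern_name != "layered"):
--         return "high"
--     # Remaining known styles are medium; anything else is unknown.
--     if style in ("microservices", "event_driven"):
--         return "medium"
--     return "unknown"
-- ===== Notes on version B (the rewrite author's own statement) =====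
-- stated objective: alternative
-- what changed: Replaces A's nested dict scan (pattern -> level -> styles list with early return) by a table-free rule-based decision: a short chain of equality/membership tests (same style is low, hexagonal+event_driven low, from monolithic or a different layered high, remaining known styles medium), exploiting the regularity of the table.
import Mathlib
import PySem

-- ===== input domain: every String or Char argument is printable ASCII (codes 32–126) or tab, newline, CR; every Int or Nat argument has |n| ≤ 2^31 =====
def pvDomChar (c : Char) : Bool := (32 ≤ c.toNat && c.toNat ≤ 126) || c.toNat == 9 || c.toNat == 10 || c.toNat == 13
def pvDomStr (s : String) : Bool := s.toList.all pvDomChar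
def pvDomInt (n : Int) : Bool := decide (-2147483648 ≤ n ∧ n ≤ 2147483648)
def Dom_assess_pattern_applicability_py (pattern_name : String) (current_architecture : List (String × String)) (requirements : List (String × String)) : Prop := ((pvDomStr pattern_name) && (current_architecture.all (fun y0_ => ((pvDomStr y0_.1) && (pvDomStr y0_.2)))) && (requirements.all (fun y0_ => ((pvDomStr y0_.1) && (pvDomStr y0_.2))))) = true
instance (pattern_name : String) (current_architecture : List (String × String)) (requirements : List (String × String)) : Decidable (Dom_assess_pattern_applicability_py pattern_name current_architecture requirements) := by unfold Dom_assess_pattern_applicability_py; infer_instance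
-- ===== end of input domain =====

set_option maxRecDepth 100000

-- B replaces A's nested table scan by a table-free chain of string-comparison rules
-- (objective: alternative; return value only, no mutation).


-- ===== PORT A =====
-- the nested literal dict of A, in insertion order
def pvApplicabilityMapA : PySem.Dict String (PySem.Dict String (List String)) :=
  PySem.Dict.mk
    [ ("microservices", PySem.Dict.mk
        [ ("high", ["monolithic", "layered"])
        , ("medium", ["event_driven"])
        , ("low", ["microservices"]) ])
    , ("layered", PySem.Dict.mk
        [ ("high", ["monolithic"])
        , ("medium", ["microservices", "event_driven"])
        , ("low", ["layered"]) ])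
    , ("event_driven", PySem.Dict.mk
        [ ("high", ["monolithic", "layered"])
        , ("medium", ["microservices"])
        , ("low", ["event_driven"]) ])
    , ("hexagonal", PySem.Dict.mk
        [ ("high", ["monolithic", "layered"])
        , ("medium", ["microservices"])
        , ("low", ["hexagonal", "event_driven"]) ]) ]

def assess_pattern_applicability_py (pattern_name : String) (current_architecture : List (String × String)) (requirements : List (String × String)) : String :=
  let current_style := (PySem.Dict.mk current_architecture).getD "style" "unknown"
  -- `if pattern_name in applicability_map:` then the for-loop with early return
  match pvApplicabilityMapA.get? pattern_name with
  | some pattern_applicability =>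
      match pattern_applicability.items.find? (fun q => q.2.contains current_style) with
      | some q => q.1
      | none => "unknown"
  | none => "unknown"

-- ===== PORT B =====
def assess_pattern_applicability_py_alt (pattern_name : String) (current_architecture : List (String × String)) (requirements : List (String × String)) : String :=
  let style := (PySem.Dict.mk current_architecture).getD "style" "unknown"
  if !(["microservices", "layered", "event_driven", "hexagonal"].contains pattern_name) then
    "unknown"
  else if style == pattern_name || (pattern_name == "hexagonal" && style == "event_driven") then
    "low"
  else if style == "monolithic" || (style == "layered" && pattern_name != "layered") then
    "high"
  else if style == "microservices" || style == "event_driven" then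
    "medium"
  else
    "unknown"

-- ===== PRECONDITION & SPEC =====
def Spec_assess_pattern_applicability_py (pattern_name : String) (current_architecture : List (String × String)) (requirements : List (String × String)) (out : String) : Prop := out = assess_pattern_applicability_py_alt pattern_name current_architecture requirements
instance (pattern_name : String) (current_architecture : List (String × String)) (requirements : List (String × String)) (out : String) : Decidable (Spec_assess_pattern_applicability_py pattern_name current_architecture requirements out) := by unfold Spec_assess_pattern_applicability_py; infer_instance

-- ===== CLAIM =====
def Claim_equal_assess_pattern_applicability_py : Prop := ∀ (pattern_name : String) (current_architecture : List (String × String)) (requirements : List (String × String)), Dom_assess_pattern_applicability_py pattern_name current_architecture requirements → Spec_assess_pattern_applicability_py pattern_name current_architecture requirements (assess_pattern_applicability_py pattern_name current_architecture requirements)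

-- ===== LEMMAS AND PROOFS =====

-- B's decision chain as a function of the two strings only
def pvRuleB (p s : String) : String :=
  if !(["microservices", "layered", "event_driven", "hexagonal"].contains p) then "unknown"
  else if s == p || (p == "hexagonal" && s == "event_driven") then "low"
  else if s == "monolithic" || (s == "layered" && p != "layered") then "high"
  else if s == "microservices" || s == "event_driven" then "medium"
  else "unknown"

theorem pv_core (p s : String) :
    (match pvApplicabilityMapA.get? p with
     | some pa =>
         (match pa.items.find? (fun q => q.2.contains s) with
          | some q => q.1
          | none => "unknown")
     | none => "unknown")
    = pvRuleB p s := by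
  by_cases h1 : p = "microservices"
  · subst h1
    by_cases e1 : s = "monolithic"; · subst e1; decide
    have f1 : ("monolithic" == s) = false := beq_eq_false_iff_ne.mpr (Ne.symm e1)
    by_cases e2 : s = "layered"; · subst e2; decide
    have f2 : ("layered" == s) = false := beq_eq_false_iff_ne.mpr (Ne.symm e2)
    by_cases e3 : s = "event_driven"; · subst e3; decide
    have f3 : ("event_driven" == s) = false := beq_eq_false_iff_ne.mpr (Ne.symm e3)
    by_cases e4 : s = "microservices"; · subst e4; decide
    have f4 : ("microservices" == s) = false := beq_eq_false_iff_ne.mpr (Ne.symm e4)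
    simp [pvApplicabilityMapA, pvRuleB, PySem.Dict.get?, List.find?, f1, f2, f3, f4, e1, e2, e3, e4]
  by_cases h2 : p = "layered"
  · subst h2
    by_cases e1 : s = "monolithic"; · subst e1; decide
    have f1 : ("monolithic" == s) = false := beq_eq_false_iff_ne.mpr (Ne.symm e1)
    by_cases e2 : s = "microservices"; · subst e2; decide
    have f2 : ("microservices" == s) = false := beq_eq_false_iff_ne.mpr (Ne.symm e2)
    by_cases e3 : s = "event_driven"; · subst e3; decide
    have f3 : ("event_driven" == s) = false := beq_eq_false_iff_ne.mpr (Ne.symm e3)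
    by_cases e4 : s = "layered"; · subst e4; decide
    have f4 : ("layered" == s) = false := beq_eq_false_iff_ne.mpr (Ne.symm e4)
    simp [pvApplicabilityMapA, pvRuleB, PySem.Dict.get?, List.find?, f1, f2, f3, f4, e1, e2, e3, e4]
  by_cases h3 : p = "event_driven"
  · subst h3
    by_cases e1 : s = "monolithic"; · subst e1; decide
    have f1 : ("monolithic" == s) = false := beq_eq_false_iff_ne.mpr (Ne.symm e1)
    by_cases e2 : s = "layered"; · subst e2; decide
    have f2 : ("layered" == s) = false := beq_eq_false_iff_ne.mpr (Ne.symm e2)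
    by_cases e3 : s = "microservices"; · subst e3; decide
    have f3 : ("microservices" == s) = false := beq_eq_false_iff_ne.mpr (Ne.symm e3)
    by_cases e4 : s = "event_driven"; · subst e4; decide
    have f4 : ("event_driven" == s) = false := beq_eq_false_iff_ne.mpr (Ne.symm e4)
    simp [pvApplicabilityMapA, pvRuleB, PySem.Dict.get?, List.find?, f1, f2, f3, f4, e1, e2, e3, e4]
  by_cases h4 : p = "hexagonal"
  · subst h4
    by_cases e1 : s = "monolithic"; · subst e1; decide
    have f1 : ("monolithic" == s) = false := beq_eq_false_iff_ne.mpr (Ne.symm e1)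
    by_cases e2 : s = "layered"; · subst e2; decide
    have f2 : ("layered" == s) = false := beq_eq_false_iff_ne.mpr (Ne.symm e2)
    by_cases e3 : s = "microservices"; · subst e3; decide
    have f3 : ("microservices" == s) = false := beq_eq_false_iff_ne.mpr (Ne.symm e3)
    by_cases e4 : s = "hexagonal"; · subst e4; decide
    have f4 : ("hexagonal" == s) = false := beq_eq_false_iff_ne.mpr (Ne.symm e4)
    by_cases e5 : s = "event_driven"; · subst e5; decide
    have f5 : ("event_driven" == s) = false := beq_eq_false_iff_ne.mpr (Ne.symm e5)
    simp [pvApplicabilityMapA, pvRuleB, PySem.Dict.get?, List.find?, f1, f2, f3, f4, f5, e1, e2, e3, e4, e5]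
  have k1 : ("microservices" == p) = false := beq_eq_false_iff_ne.mpr (Ne.symm h1)
  have k2 : ("layered" == p) = false := beq_eq_false_iff_ne.mpr (Ne.symm h2)
  have k3 : ("event_driven" == p) = false := beq_eq_false_iff_ne.mpr (Ne.symm h3)
  have k4 : ("hexagonal" == p) = false := beq_eq_false_iff_ne.mpr (Ne.symm h4)
  simp [pvApplicabilityMapA, pvRuleB, PySem.Dict.get?, List.find?, k1, k2, k3, k4, h1, h2, h3, h4]

-- ===== VERDICT =====
theorem assess_pattern_applicability_py_spec : Claim_equal_assess_pattern_applicability_py := by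
  intro p ca req _
  unfold Spec_assess_pattern_applicability_py assess_pattern_applicability_py assess_pattern_applicability_py_alt
  exact pv_core p ((PySem.Dict.mk ca).getD "style" "unknown")
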